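-- pv_equiv track=rewrite | github.com/viennamccarthy/open-psalter | src/data/sources/create_psalter.py | swap_spaces_multispace
-- ===== SOURCE A (Python) =====
-- def swap_spaces_multispace(line):
--     if isinstance(line, list):
--         new_line = []
--         for section in line:
--             spaces = check_chars(section)
--             if spaces is not None:
--                 new_section = section
--                 for index in spaces:
--                     new_section = new_section[:index] + "&nbsp;" + new_section[index + 1:]
--                 new_line.append(new_section)
--             else:
--                 new_line.append(section)
--         return new_line
--     else:
--         spaces = check_chars(line)
--         if spaces is not None:
--             new_line = line
--             for index in spaces:
--                 new_line = new_line[:index] + "&nbsp;" + new_line[index + 1:]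
--             return new_line
--         else:
--             return line
--
-- def check_chars(line):
--
--     if line.endswith("⁕</span>"):
--         new_line = line[:-32]
--         return check_chars(new_line)
--     elif "</span>" in line[-12:]:
--         p = line.rfind(">", -12, -1)
--         spaces = line.count(" ", p, -1)
--         if spaces != 0:
--             if "&nb" in line:
--                 spaces = 1
--             elif spaces > 2:
--                 spaces = 2
--             new_line = line
--             spaces_indices = []
--             for _ in range(spaces):
--                 index = new_line.rfind(" ", p, -1)
--                 spaces_indices.append(index)
--                 new_line = new_line[:index]
--             return spaces_indices
--         else:
--             p = line.rfind("<s") + 1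
--             new_line = line[:p]
--             return check_chars(new_line)
--     else:
--         spaces = line.count(" ", -12, -1)
--         if spaces != 0:
--             if "&nb" in line:
--                 if len(line) > 50:
--                     spaces = 1
--                 else:
--                     return None
--             if spaces > 2:
--                 spaces = 2
--             new_line = line
--             spaces_indices = []
--             for _ in range(spaces):
--                 index = new_line.rfind(" ", -12, -1)
--                 spaces_indices.append(index)
--                 new_line = new_line[:index]
--             return spaces_indices
--         else:
--             return None
-- ===== SOURCE B (Python) =====
-- def swap_spaces_multispace(line):
--     if isinstance(line, list):
--         return [_fix_section(s) for s in line]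
--     return _fix_section(line)
--
--
-- def _fix_section(s):
--     idxs = _trailing_space_indices(s)
--     if idxs is None:
--         return s
--     for i in idxs:
--         s = s[:i] + "&nbsp;" + s[i + 1:]
--     return s
--
--
-- def _trailing_space_indices(work):
--     # iterative: trim the asterisk-span suffix / the trailing "<s" region in a loop,
--     # then handle both window kinds through one unified path (no string truncation:
--     # trailing-space indices are collected on the original string with a moving bound)
--     while True:
--         if work.endswith("\u2055</span>"):
--             work = work[:-32]
--             continue
--         span = "</span>" in work[-12:]
--         if span:
--             start = work.rfind(">", -12, -1)
--         else:
--             start = max(len(work) - 12, 0)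
--         spaces = work[start:-1].count(" ")  # == work.count(" ", start, -1)
--         if spaces == 0:
--             if span:
--                 work = work[:work.rfind("<s") + 1]
--                 continue
--             return None
--         if "&nb" in work and (not span and len(work) <= 50):
--             return None
--         if "&nb" in work:
--             spaces = 1
--         spaces = min(spaces, 2)
--         out = []
--         n = len(work)
--         for _ in range(spaces):
--             lo = start if span else max(n - 12, 0)
--             i = work.rfind(" ", lo, max(n - 1, 0))
--             out.append(i)
--             n = i
--         return out
-- ===== Notes on version B (the rewrite author's own statement) =====
-- stated objective: alternative
-- what changed: check_chars's self-recursion becomes one fuelled while-loop whose two window kinds share a single unified space-counting/capping path, and the trailing-space indices are collected on the original string through a moving end bound instead of repeatedly truncating and re-scanning the working string.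
import Mathlib
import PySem

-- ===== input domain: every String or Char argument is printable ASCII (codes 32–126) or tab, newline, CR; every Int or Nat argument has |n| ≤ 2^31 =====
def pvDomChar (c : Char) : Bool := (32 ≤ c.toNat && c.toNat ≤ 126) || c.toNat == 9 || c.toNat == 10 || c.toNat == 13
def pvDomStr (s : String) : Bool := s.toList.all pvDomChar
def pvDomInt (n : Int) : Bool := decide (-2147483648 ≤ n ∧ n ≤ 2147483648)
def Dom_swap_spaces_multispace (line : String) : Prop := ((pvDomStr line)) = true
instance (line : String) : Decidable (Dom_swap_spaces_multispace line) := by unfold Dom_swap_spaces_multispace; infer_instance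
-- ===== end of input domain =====

-- B rewrites check_chars's self-recursion as one fuelled loop with a single unified
-- space-collection path that never truncates the working string (indices are found on the
-- original string through a moving end bound); objective: alternative decomposition.

-- ===== PORT A =====
-- termination facts the port's `decreasing_by` cites (proofs of the go-spec lemmas are below with the other lemmas? no: needed here)

-- rfind.go returns -1 or a prefix position within bounds
theorem pvGoSpec (s sub : List Char) :
    ∀ k : Nat, PySem.Chars.rfind.go s sub k = -1 ∨
      (0 ≤ PySem.Chars.rfind.go s sub k ∧ (PySem.Chars.rfind.go s sub k).toNat ≤ k ∧
        sub.isPrefixOf (s.drop (PySem.Chars.rfind.go s sub k).toNat) = true) := by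
  intro k
  induction k with
  | zero =>
    simp only [PySem.Chars.rfind.go]
    by_cases h : sub.isPrefixOf s = true <;> simp [h]
  | succ j ihj =>
    simp only [PySem.Chars.rfind.go]
    by_cases h : sub.isPrefixOf (s.drop (j + 1)) = true
    · right
      refine ?_
      simp only [h, if_true]
      refine ⟨by positivity, by omega, ?_⟩
      simpa using h
    · simp only [h]
      rcases ihj with h1 | ⟨h1, h2, h3⟩
      · left; exact h1
      · right; exact ⟨h1, by omega, h3⟩

-- rfind either misses or points at an in-range occurrence of sub
theorem pvRfindSpec (s sub : List Char) :
    PySem.Chars.rfind s sub = -1 ∨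
      (0 ≤ PySem.Chars.rfind s sub ∧
        (PySem.Chars.rfind s sub).toNat + sub.length ≤ s.length) := by
  rcases pvGoSpec s sub s.length with h | ⟨h1, h2, h3⟩
  · left; simpa [PySem.Chars.rfind] using h
  · right
    refine ⟨by simpa [PySem.Chars.rfind] using h1, ?_⟩
    have hpre := List.IsPrefix.length_le (List.isPrefixOf_iff_prefix.mp h3)
    simp only [List.length_drop] at hpre
    have : sub.length ≤ s.length - (PySem.Chars.rfind.go s sub s.length).toNat := hpre
    simp only [PySem.Chars.rfind]
    omega

-- trimming the "⁕</span>" suffix shortens the string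
theorem pvTrim1_lt (s : List Char) (h : PySem.Chars.endswith s "⁕</span>".toList = true) :
    (PySem.List.slice s none (some (-32))).length < s.length := by
  have hs : "⁕</span>".toList <:+ s := (PySem.Chars.endswith_iff _ _).mp h
  have hlen : 8 ≤ s.length := by
    have := hs.length_le
    simpa using this
  rw [PySem.List.slice_to_neg_ofNat s 32 (by omega)]
  simp only [List.length_take]
  omega

-- trimming back to the last "<s" shortens the string (the </span> tail guarantees length ≥ 7)
theorem pvTrim2_lt (s : List Char)
    (h : PySem.Chars.isIn "</span>".toList (PySem.List.slice s (some (-12)) none) = true) :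
    (PySem.List.slice s none (some (PySem.Chars.rfind s "<s".toList + 1))).length < s.length := by
  have hinf : "</span>".toList <:+: PySem.List.slice s (some (-12)) none :=
    (PySem.Chars.isIn_iff_infix _ _).mp h
  have h7 : 7 ≤ (PySem.List.slice s (some (-12)) none).length := by
    have := hinf.length_le
    simpa using this
  have hsl : (PySem.List.slice s (some (-12)) none).length ≤ s.length := by
    simp [PySem.List.slice, PySem.List.clampIdx]
  have hlen : 7 ≤ s.length := le_trans h7 hsl
  rcases pvRfindSpec s "<s".toList with hr | ⟨hr0, hrle⟩
  · rw [hr]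
    norm_num [PySem.List.slice, PySem.List.clampIdx]
    omega
  · set r := PySem.Chars.rfind s "<s".toList with hrdef
    have hr1 : (0:Int) ≤ r + 1 := by omega
    rw [PySem.List.slice_to s hr1]
    simp only [List.length_take]
    have h2s : ("<s".toList).length = 2 := by decide
    rw [h2s] at hrle
    omega

-- literal transliteration of check_chars (the isinstance-list branch of the caller is dead
-- for a str argument; count(" ", a, b) is ported as the ' '-count of the slice s[a:b],
-- exact for a one-character needle)
def pvCheckCharsA (s : List Char) : Option (List Int) :=
  if h1 : PySem.Chars.endswith s "⁕</span>".toList = true then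
    pvCheckCharsA (PySem.List.slice s none (some (-32)))
  else if h2 : PySem.Chars.isIn "</span>".toList (PySem.List.slice s (some (-12)) none) = true then
    let p : Int := PySem.Chars.rfindFrom s ">".toList (-12) (some (-1))
    let spaces : Int := ((PySem.List.slice s (some p) (some (-1))).count ' ' : Int)
    if spaces ≠ 0 then
      let spaces2 : Int :=
        if PySem.Chars.isIn "&nb".toList s = true then 1
        else if spaces > 2 then 2 else spaces
      some (((PySem.List.pyRange 0 spaces2 1).foldl
        (fun (st : List Char × List Int) _ =>
          let index := PySem.Chars.rfindFrom st.1 [' '] p (some (-1))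
          (PySem.List.slice st.1 none (some index), st.2 ++ [index]))
        (s, [])).2)
    else
      pvCheckCharsA (PySem.List.slice s none (some (PySem.Chars.rfind s "<s".toList + 1)))
  else
    let spaces : Int := ((PySem.List.slice s (some (-12)) (some (-1))).count ' ' : Int)
    if spaces ≠ 0 then
      -- Python's early `return None` (("&nb" in line) and len ≤ 50) becomes the `none`
      -- below; the single collection loop is shared via `collect` as in the source
      let collect := fun (spaces2 : Int) =>
        (((PySem.List.pyRange 0 spaces2 1).foldl
          (fun (st : List Char × List Int) _ =>
            let index := PySem.Chars.rfindFrom st.1 [' '] (-12) (some (-1))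
            (PySem.List.slice st.1 none (some index), st.2 ++ [index]))
          (s, [])).2)
      if PySem.Chars.isIn "&nb".toList s = true then
        if (s.length : Int) > 50 then some (collect (if (1:Int) > 2 then 2 else 1))
        else none
      else some (collect (if spaces > 2 then 2 else spaces))
    else none
termination_by s.length
decreasing_by
  · exact pvTrim1_lt s h1
  · exact pvTrim2_lt s h2

def swap_spaces_multispace (line : String) : String :=
  match pvCheckCharsA line.toList with
  | some spaces =>
      String.ofList (spaces.foldl
        (fun nl index =>
          PySem.List.slice nl none (some index) ++ "&nbsp;".toList ++
            PySem.List.slice nl (some (index + 1)) none)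
        line.toList)
  | none => line

-- ===== PORT B =====
-- one unified collection loop: indices are taken from the ORIGINAL string via a moving
-- end bound n, never by truncating the working string
def pvCollectB (work : List Char) (span : Bool) (start : Int) (spaces : Int) : List Int :=
  ((PySem.List.pyRange 0 spaces 1).foldl
    (fun (st : Int × List Int) _ =>
      let lo : Int := if span then start else max (st.1 - 12) 0
      let i := PySem.Chars.rfindFrom work [' '] lo (some (max (st.1 - 1) 0))
      (i, st.2 ++ [i]))
    ((work.length : Int), [])).2

-- the while-loop of B's _trailing_space_indices, fuelled (the loop only continues on a
-- strictly shorter working string, so fuel length+1 is never exhausted)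
def pvLoopB : Nat → List Char → Option (List Int)
  | 0, _ => none
  | fuel + 1, work =>
    if PySem.Chars.endswith work "⁕</span>".toList = true then
      pvLoopB fuel (PySem.List.slice work none (some (-32)))
    else
      let span := PySem.Chars.isIn "</span>".toList (PySem.List.slice work (some (-12)) none)
      let start : Int :=
        if span then PySem.Chars.rfindFrom work ">".toList (-12) (some (-1))
        else max ((work.length : Int) - 12) 0
      let spaces : Int := ((PySem.List.slice work (some start) (some (-1))).count ' ' : Int)
      if spaces = 0 then
        if span then
          pvLoopB fuel (PySem.List.slice work none (some (PySem.Chars.rfind work "<s".toList + 1)))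
        else none
      else if (PySem.Chars.isIn "&nb".toList work && (!span && decide ((work.length : Int) ≤ 50))) = true then
        none
      else
        let spaces1 : Int := if PySem.Chars.isIn "&nb".toList work = true then 1 else spaces
        some (pvCollectB work span start (min spaces1 2))

def swap_spaces_multispace_alt (line : String) : String :=
  match pvLoopB (line.toList.length + 1) line.toList with
  | some idxs =>
      String.ofList (idxs.foldl
        (fun nl index =>
          PySem.List.slice nl none (some index) ++ "&nbsp;".toList ++
            PySem.List.slice nl (some (index + 1)) none)
        line.toList)
  | none => line

-- ===== PRECONDITION & SPEC =====
def Spec_swap_spaces_multispace (line : String) (out : String) : Prop := out = swap_spaces_multispace_alt line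
instance (line : String) (out : String) : Decidable (Spec_swap_spaces_multispace line out) := by unfold Spec_swap_spaces_multispace; infer_instance

-- ===== CLAIM (what is proved, stated in full; the proofs are below) =====
def Claim_equal_swap_spaces_multispace : Prop := ∀ (line : String), Dom_swap_spaces_multispace line → Spec_swap_spaces_multispace line (swap_spaces_multispace line)

-- ===== LEMMAS AND PROOFS =====

theorem pvGoFind (s : List Char) (sub : List Char) :
    ∀ k j : Nat, j ≤ k → sub.isPrefixOf (s.drop j) = true →
      0 ≤ PySem.Chars.rfind.go s sub k := by
  intro k
  induction k with
  | zero =>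
    intro j hj hp
    interval_cases j
    simp only [PySem.Chars.rfind.go]
    simp only [List.drop_zero] at hp
    simp [hp]
  | succ m ihm =>
    intro j hj hp
    simp only [PySem.Chars.rfind.go]
    by_cases h : sub.isPrefixOf (s.drop (m + 1)) = true
    · simp [h]; positivity
    · simp only [h]
      have hjm : j ≤ m := by
        rcases Nat.lt_or_ge j (m+1) with h' | h'
        · omega
        · exfalso; have : j = m + 1 := by omega
          rw [this] at hp; exact h hp
      exact ihm j hjm hp

theorem pvRfindMem (l : List Char) (c : Char) (hc : c ∈ l) :
    0 ≤ PySem.Chars.rfind l [c] := by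
  obtain ⟨j, hj, hget⟩ := List.mem_iff_getElem.mp hc
  have hp : [c].isPrefixOf (l.drop j) = true := by
    have : l.drop j = c :: l.drop (j+1) := by
      rw [List.drop_eq_getElem_cons hj, hget]
    rw [this]
    simp [List.isPrefixOf]
  exact pvGoFind l [c] l.length j (by omega) hp

theorem pvRfindFrom_eq (s sub : List Char) (st e : Int) (hst : 0 ≤ st) (he : 0 ≤ e)
    (hel : e ≤ s.length) :
    PySem.Chars.rfindFrom s sub st (some e) =
      if e < st then -1
      else if PySem.Chars.rfind ((s.take e.toNat).drop st.toNat) sub = -1 then -1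
      else st + PySem.Chars.rfind ((s.take e.toNat).drop st.toNat) sub := by
  simp only [PySem.Chars.rfindFrom]
  rw [if_neg (show ¬ (s.length : Int) < e by omega),
      if_neg (show ¬ e < (0:Int) by omega),
      if_neg (show ¬ st < (0:Int) by omega)]

theorem pvRfindFrom_norm (s sub : List Char) (st : Int) :
    PySem.Chars.rfindFrom s sub st (some (-1)) =
      PySem.Chars.rfindFrom s sub (if st < 0 then max (st + s.length) 0 else st)
        (some (max ((s.length : Int) - 1) 0)) := by
  have hstB : (0:Int) ≤ (if st < 0 then max (st + s.length) 0 else st) := by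
    split_ifs <;> omega
  rw [pvRfindFrom_eq s sub _ _ hstB (by omega) (by omega)]
  simp only [PySem.Chars.rfindFrom]
  rw [if_neg (show ¬ (s.length : Int) < -1 by omega), if_pos (show (-1:Int) < 0 by omega)]
  rcases Nat.eq_zero_or_pos s.length with h0 | h0
  · rw [if_pos (show (-1:Int) + s.length < 0 by omega)]
    have he : (max ((s.length:Int) - 1) 0) = 0 := by omega
    rw [he]
    by_cases hst : st < 0
    · rw [if_pos hst, if_pos hst]
      by_cases h2 : st + (s.length:Int) < 0
      · rw [if_pos h2]
        rw [if_neg (show ¬ (0:Int) < (max (st + (s.length:Int)) 0) by omega)]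
        have : (max (st + (s.length:Int)) 0) = 0 := by omega
        rw [this, if_neg (show ¬ (0:Int) < 0 by omega)]
      · exact absurd (show st + (s.length:Int) < 0 by omega) h2
    · rw [if_neg hst, if_neg hst]
  · rw [if_neg (show ¬ (-1:Int) + s.length < 0 by omega)]
    have he : (max ((s.length:Int) - 1) 0) = -1 + s.length := by omega
    rw [he]
    by_cases hst : st < 0
    · rw [if_pos hst, if_pos hst]
      by_cases h2 : st + (s.length:Int) < 0
      · rw [if_pos h2]
        have : (max (st + (s.length:Int)) 0) = 0 := by omega
        rw [this]
      · rw [if_neg h2]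
        have : (max (st + (s.length:Int)) 0) = st + s.length := by omega
        rw [this]
    · rw [if_neg hst, if_neg hst]
theorem pvRfind_nonneg (W sub : List Char) (h : PySem.Chars.rfind W sub ≠ -1) :
    0 ≤ PySem.Chars.rfind W sub := by
  rcases pvGoSpec W sub W.length with h1 | ⟨h1, _, _⟩
  · exact absurd (by simpa [PySem.Chars.rfind] using h1) h
  · simpa [PySem.Chars.rfind] using h1

theorem pvRfindFrom_cases (s sub : List Char) (st : Int) (e? : Option Int) :
    PySem.Chars.rfindFrom s sub st e? = -1 ∨ 0 ≤ PySem.Chars.rfindFrom s sub st e? := by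
  simp only [PySem.Chars.rfindFrom]
  split_ifs <;> try (left; rfl)
  all_goals right
  all_goals (rename_i hne; have hr := pvRfind_nonneg _ sub hne; omega)

theorem pvRfindFrom_take (s sub : List Char) (i stA : Int) (hi : 0 ≤ i) (hil : (i:Int) ≤ s.length) :
    PySem.Chars.rfindFrom (PySem.List.slice s none (some i)) sub stA (some (-1)) =
      PySem.Chars.rfindFrom s sub (if stA < 0 then max (stA + i) 0 else stA)
        (some (max (i - 1) 0)) := by
  rw [PySem.List.slice_to s hi, pvRfindFrom_norm]
  have hlen : ((s.take i.toNat).length : Int) = i := by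
    simp only [List.length_take]
    omega
  rw [hlen]
  have h1 : (0:Int) ≤ if stA < 0 then max (stA + i) 0 else stA := by split_ifs <;> omega
  have hem : (0:Int) ≤ max (i - 1) 0 := by omega
  rw [pvRfindFrom_eq _ sub _ _ h1 hem (by rw [hlen]; omega),
      pvRfindFrom_eq s sub _ _ h1 hem (by omega)]
  rw [List.take_take]
  have : min (max (i-1) 0).toNat i.toNat = (max (i-1) 0).toNat := by omega
  rw [this]
theorem pvSliceEq (s : List Char) (st : Int) (h0 : 0 < s.length)
    (hlt : st < s.length) :
    PySem.List.slice s (some st) (some (-1)) =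
      List.drop (if st < 0 then max (st + s.length) 0 else st).toNat
        (List.take (s.length - 1) s) := by
  simp only [PySem.List.slice, PySem.List.clampIdx]
  rw [List.drop_take]
  split_ifs <;> (congr 1 <;> (try omega) <;> congr 1 <;> omega)

theorem pvSliceNilOfGe (s : List Char) (st : Int) (hge : (s.length : Int) ≤ st) :
    PySem.List.slice s (some st) (some (-1)) = [] := by
  simp only [PySem.List.slice, PySem.List.clampIdx]
  split_ifs <;> (rw [List.take_eq_nil_iff]; left; omega)
theorem pvRfindFrom_pos (s : List Char) (st : Int)
    (h : (PySem.List.slice s (some st) (some (-1))).count ' ' ≠ 0) :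
    0 ≤ PySem.Chars.rfindFrom s [' '] st (some (-1)) ∧
      PySem.Chars.rfindFrom s [' '] st (some (-1)) < s.length := by
  rcases Nat.eq_zero_or_pos s.length with h0 | h0
  · exfalso
    apply h
    have hs : s = [] := List.length_eq_zero_iff.mp h0
    simp [hs, PySem.List.slice]
  have hlt : st < (s.length : Int) := by
    by_contra hge
    exact h (by rw [pvSliceNilOfGe s st (by omega)]; rfl)
  set stB : Int := if st < 0 then max (st + s.length) 0 else st with hstB
  have hB0 : 0 ≤ stB := by rw [hstB]; split_ifs <;> omega
  have hBe : stB ≤ (s.length : Int) - 1 := by rw [hstB]; split_ifs <;> omega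
  have hw : PySem.List.slice s (some st) (some (-1)) =
      List.drop stB.toNat (List.take (s.length - 1) s) := pvSliceEq s st h0 hlt
  rw [hw] at h
  set W : List Char := List.drop stB.toNat (List.take (s.length - 1) s) with hW
  have hmem : ' ' ∈ W := by
    rcases List.count_pos_iff.mp (Nat.pos_of_ne_zero h) with hmem
    exact hmem
  have hr0 : 0 ≤ PySem.Chars.rfind W [' '] := pvRfindMem W ' ' hmem
  have hrlt : (PySem.Chars.rfind W [' ']).toNat < W.length := by
    rcases pvGoSpec W [' '] W.length with h1 | ⟨h1, h2, h3⟩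
    · exact absurd (show PySem.Chars.rfind W [' '] = -1 by simpa [PySem.Chars.rfind] using h1)
        (by omega)
    · have hne : W.drop (PySem.Chars.rfind.go W [' '] W.length).toNat ≠ [] := by
        intro hnil
        rw [hnil] at h3
        simp [List.isPrefixOf] at h3
      have : (PySem.Chars.rfind.go W [' '] W.length).toNat < W.length := by
        by_contra hge
        exact hne (List.drop_eq_nil_of_le (by omega))
      simpa [PySem.Chars.rfind] using this
  have hWlen : W.length = s.length - 1 - stB.toNat := by
    rw [hW]
    simp only [List.length_drop, List.length_take]
    omega
  rw [pvRfindFrom_norm, ← hstB,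
      pvRfindFrom_eq s [' '] stB _ hB0 (by omega) (by omega)]
  rw [if_neg (show ¬ max ((s.length:Int) - 1) 0 < stB by omega)]
  have hwin : (s.take (max ((s.length:Int) - 1) 0).toNat).drop stB.toNat = W := by
    rw [hW]
    have hmx : (max ((s.length:Int) - 1) 0).toNat = s.length - 1 := by omega
    rw [hmx]
  rw [hwin]
  rw [if_neg (show ¬ PySem.Chars.rfind W [' '] = -1 by omega)]
  have hx1 : PySem.Chars.rfind W [' '] < (W.length : Int) := by omega
  have hx2 : ((W.length : Int)) = (s.length : Int) - 1 - stB := by omega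
  constructor
  · omega
  · omega
theorem pvRange1 : PySem.List.pyRange 0 1 1 = [0] := by decide
theorem pvRange2 : PySem.List.pyRange 0 2 1 = [0, 1] := by decide

theorem pvCollect_span (s : List Char) (p k : Int) (hp : 0 ≤ p) (hk : k = 1 ∨ k = 2)
    (hcnt : (PySem.List.slice s (some p) (some (-1))).count ' ' ≠ 0) :
    (((PySem.List.pyRange 0 k 1).foldl
      (fun (st : List Char × List Int) _ =>
        let index := PySem.Chars.rfindFrom st.1 [' '] p (some (-1))
        (PySem.List.slice st.1 none (some index), st.2 ++ [index]))
      (s, [])).2) = pvCollectB s true p k := by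
  obtain ⟨h0, hlt⟩ := pvRfindFrom_pos s p hcnt
  have hfirst : PySem.Chars.rfindFrom s [' '] p (some (-1)) =
      PySem.Chars.rfindFrom s [' '] p (some (max ((s.length : Int) - 1) 0)) := by
    rw [pvRfindFrom_norm]
    rw [if_neg (show ¬ p < 0 by omega)]
  set i1 : Int := PySem.Chars.rfindFrom s [' '] p (some (-1)) with hi1
  have hsecond : PySem.Chars.rfindFrom (PySem.List.slice s none (some i1)) [' '] p (some (-1)) =
      PySem.Chars.rfindFrom s [' '] p (some (max (i1 - 1) 0)) := by
    rw [pvRfindFrom_take s [' '] i1 p (by omega) (by omega)]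
    rw [if_neg (show ¬ p < 0 by omega)]
  rcases hk with hk | hk <;> subst hk
  · rw [pvRange1]
    simp only [pvCollectB, pvRange1, List.foldl, reduceIte]
    rw [← hfirst]
  · rw [pvRange2]
    simp only [pvCollectB, pvRange2, List.foldl, reduceIte]
    rw [← hfirst, hsecond]

theorem pvCollect_tail (s : List Char) (startB k : Int) (hk : k = 1 ∨ k = 2)
    (hcnt : (PySem.List.slice s (some (-12)) (some (-1))).count ' ' ≠ 0) :
    (((PySem.List.pyRange 0 k 1).foldl
      (fun (st : List Char × List Int) _ =>
        let index := PySem.Chars.rfindFrom st.1 [' '] (-12) (some (-1))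
        (PySem.List.slice st.1 none (some index), st.2 ++ [index]))
      (s, [])).2) = pvCollectB s false startB k := by
  obtain ⟨h0, hlt⟩ := pvRfindFrom_pos s (-12) hcnt
  have hfirst : PySem.Chars.rfindFrom s [' '] (-12) (some (-1)) =
      PySem.Chars.rfindFrom s [' '] (max ((s.length : Int) - 12) 0) (some (max ((s.length : Int) - 1) 0)) := by
    rw [pvRfindFrom_norm]
    rw [if_pos (show (-12:Int) < 0 by omega)]
    have : max (-12 + (s.length : Int)) 0 = max ((s.length : Int) - 12) 0 := by omega
    rw [this]
  set i1 : Int := PySem.Chars.rfindFrom s [' '] (-12) (some (-1)) with hi1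
  have hsecond : PySem.Chars.rfindFrom (PySem.List.slice s none (some i1)) [' '] (-12) (some (-1)) =
      PySem.Chars.rfindFrom s [' '] (max (i1 - 12) 0) (some (max (i1 - 1) 0)) := by
    rw [pvRfindFrom_take s [' '] i1 (-12) (by omega) (by omega)]
    rw [if_pos (show (-12:Int) < 0 by omega)]
    have : max (-12 + i1) 0 = max (i1 - 12) 0 := by omega
    rw [this]
  rcases hk with hk | hk <;> subst hk
  · rw [pvRange1]
    simp only [pvCollectB, pvRange1, List.foldl, Bool.false_eq_true, if_false]
    rw [← hfirst]
  · rw [pvRange2]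
    simp only [pvCollectB, pvRange2, List.foldl, Bool.false_eq_true, if_false]
    rw [← hfirst, hsecond]

theorem pvSliceSelf (s : List Char) :
    PySem.List.slice s (some (-1)) (some (-1)) = [] := by
  simp [PySem.List.slice]

theorem pvSliceStart12 (s : List Char) :
    PySem.List.slice s (some (-12)) (some (-1)) =
      PySem.List.slice s (some (max ((s.length : Int) - 12) 0)) (some (-1)) := by
  simp only [PySem.List.slice, PySem.List.clampIdx]
  split_ifs <;> (congr 1 <;> (try omega) <;> congr 1 <;> omega)

theorem pvCC_eq : ∀ (fuel : Nat) (s : List Char), s.length < fuel →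
    pvCheckCharsA s = pvLoopB fuel s := by
  intro fuel
  induction fuel with
  | zero => intro s hs; omega
  | succ fuel ih =>
    intro s hs
    rw [pvCheckCharsA]
    by_cases h1 : PySem.Chars.endswith s "⁕</span>".toList = true
    · rw [dif_pos h1]
      simp only [pvLoopB]
      rw [if_pos h1]
      exact ih _ (by have := pvTrim1_lt s h1; omega)
    · rw [dif_neg h1]
      simp only [pvLoopB]
      rw [if_neg h1]
      by_cases h2 : PySem.Chars.isIn "</span>".toList (PySem.List.slice s (some (-12)) none) = true
      · rw [dif_pos h2]
        simp only [h2, if_true]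
        set p : Int := PySem.Chars.rfindFrom s ">".toList (-12) (some (-1)) with hp
        by_cases hz : ((PySem.List.slice s (some p) (some (-1))).count ' ' : Int) = 0
        · rw [if_neg (by omega), if_pos hz]
          exact ih _ (by have := pvTrim2_lt s h2; omega)
        · rw [if_pos (by omega), if_neg hz]
          have hcnt : (PySem.List.slice s (some p) (some (-1))).count ' ' ≠ 0 := by
            simpa using hz
          have hp0 : 0 ≤ p := by
            rcases pvRfindFrom_cases s ">".toList (-12) (some (-1)) with hc | hc
            · exfalso
              apply hcnt
              rw [hp, hc, pvSliceSelf]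
              rfl
            · rw [hp]; exact hc
          have hsp1 : (1:Int) ≤ ((PySem.List.slice s (some p) (some (-1))).count ' ' : Int) := by
            omega
          by_cases hnb : PySem.Chars.isIn "&nb".toList s = true
          · simp only [hnb, if_true, Bool.not_true, Bool.false_and, Bool.and_false,
              Bool.false_eq_true, if_false]
            rw [pvCollect_span s p 1 hp0 (Or.inl rfl) hcnt]
            norm_num
          · have hbnb : PySem.Chars.isIn "&nb".toList s = false := by
              simpa using hnb
            simp only [hbnb, Bool.false_and, Bool.false_eq_true, if_false]
            set c : Int := ((PySem.List.slice s (some p) (some (-1))).count ' ' : Int) with hc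
            have hmin : min c 2 = if c > 2 then 2 else c := by
              split_ifs <;> omega
            have hk : (if c > 2 then 2 else c) = 1 ∨ (if c > 2 then 2 else c) = 2 := by
              split_ifs <;> omega
            rw [pvCollect_span s p _ hp0 hk hcnt, hmin]
      · rw [dif_neg h2]
        have hb2 : PySem.Chars.isIn "</span>".toList (PySem.List.slice s (some (-12)) none) = false := by
          simpa using h2
        simp only [hb2, Bool.false_eq_true, if_false]
        rw [← pvSliceStart12]
        by_cases hz : ((PySem.List.slice s (some (-12)) (some (-1))).count ' ' : Int) = 0
        · rw [if_neg (by omega), if_pos hz]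
        · rw [if_pos (by omega), if_neg hz]
          have hcnt : (PySem.List.slice s (some (-12)) (some (-1))).count ' ' ≠ 0 := by
            simpa using hz
          by_cases hnb : PySem.Chars.isIn "&nb".toList s = true
          · by_cases h50 : (50:Int) < s.length
            · simp only [hnb, if_true, Bool.true_and, Bool.not_false]
              rw [if_pos h50,
                if_neg (show ¬ (decide ((s.length:Int) ≤ 50) = true) by
                  simpa using (by omega : ¬ ((s.length:Int) ≤ 50)))]
              rw [pvCollect_tail s (max ((s.length:Int) - 12) 0) _ (show ((if (1:Int) > 2 then 2 else (1:Int)) = 1 ∨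
                (if (1:Int) > 2 then 2 else (1:Int)) = 2) by norm_num) hcnt]
              norm_num
            · simp only [hnb, if_true, Bool.true_and, Bool.not_false]
              rw [if_neg h50,
                if_pos (show decide ((s.length:Int) ≤ 50) = true by
                  simpa using (by omega : (s.length:Int) ≤ 50))]
          · have hbnb : PySem.Chars.isIn "&nb".toList s = false := by simpa using hnb
            simp only [hbnb, Bool.false_and, Bool.false_eq_true, if_false]
            set c : Int := ((PySem.List.slice s (some (-12)) (some (-1))).count ' ' : Int) with hcdef
            have hc1 : (1:Int) ≤ c := by omega
            have hmin : min c 2 = if c > 2 then 2 else c := by split_ifs <;> omega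
            have hk : (if c > 2 then 2 else c) = 1 ∨ (if c > 2 then 2 else c) = 2 := by
              split_ifs <;> omega
            rw [pvCollect_tail s (max ((s.length:Int) - 12) 0) _ hk hcnt, hmin]

-- ===== VERDICT (by name: the statement is the Claim_ definition above) =====
theorem swap_spaces_multispace_spec : Claim_equal_swap_spaces_multispace := by
  intro line _
  unfold Spec_swap_spaces_multispace swap_spaces_multispace swap_spaces_multispace_alt
  rw [pvCC_eq (line.toList.length + 1) line.toList (by omega)]
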